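-- pv_equiv track=rewrite | github.com/leelesh-raya/learning-log | week-01/codes/practice30.py | organise
-- ===== SOURCE A (Python) =====
-- def organise(eggs):
--     cheese=[]
--     for item in eggs:
--         if item not in cheese:
--             cheese.append(item)
--     for i in range(len(cheese)-1):
--         swapped=False
--         for j in range(len(cheese)-1):
--             if len(cheese[j])>len(cheese[j+1]):
--                 buffer=cheese[j]
--                 cheese[j]=cheese[j+1]
--                 cheese[j+1]=buffer
--                 swapped=True
--
--             elif len(cheese[j])==len(cheese[j+1]):
--                 a=[cheese[j], cheese[j+1]]
--                 a.sort()
--                 cheese[j]=a[0]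
--                 cheese[j+1]=a[1]
--                 swapped=True
--
--
--
--         if not swapped:
--             break
--
--     return ' | '.join(cheese)
-- ===== SOURCE B (Python) =====
-- def organise(eggs):
--     return ' | '.join(sorted(set(eggs), key=lambda s: (len(s), s)))
-- ===== Notes on version B (the rewrite author's own statement) =====
-- stated objective: faster
-- what changed: Replaces the manual membership-scan dedup plus handwritten bubble sort with a set() for deduplication and one library sorted() call keyed by (len, string).
import Mathlib
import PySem

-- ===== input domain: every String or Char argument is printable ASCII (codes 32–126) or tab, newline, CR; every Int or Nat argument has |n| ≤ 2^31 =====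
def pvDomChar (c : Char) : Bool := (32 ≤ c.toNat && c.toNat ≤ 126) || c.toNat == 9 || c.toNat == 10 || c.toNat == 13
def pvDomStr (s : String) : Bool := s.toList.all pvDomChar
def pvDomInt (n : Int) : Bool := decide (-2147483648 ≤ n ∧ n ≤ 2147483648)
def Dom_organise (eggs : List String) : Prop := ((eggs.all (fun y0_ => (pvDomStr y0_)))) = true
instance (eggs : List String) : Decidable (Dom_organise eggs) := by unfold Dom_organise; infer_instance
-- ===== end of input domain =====

-- B deduplicates with set() and sorts once with key (len, s) instead of A's membership-scan dedup and handwritten bubble sort.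

-- ===== PORT A =====
-- inner j-loop of A's bubble sort, one left-to-right pass over the current list; Bool = 'swapped'
def passA : List String → List String × Bool
  | [] => ([], false)
  | [x] => ([x], false)
  | x :: y :: t =>
    if PySem.Str.len x > PySem.Str.len y then
      ((y :: (passA (x :: t)).1), true)
    else if PySem.Str.len x = PySem.Str.len y then
      -- a = [cheese[j], cheese[j+1]]; a.sort(); a[0], a[1]  (a has length 2, so the pyGetD defaults are never used)
      ((PySem.List.pyGetD (PySem.List.sorted [x, y] (fun s => s) false) 0 x ::
        (passA (PySem.List.pyGetD (PySem.List.sorted [x, y] (fun s => s) false) 1 y :: t)).1), true)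
    else
      ((x :: (passA (y :: t)).1), (passA (y :: t)).2)
  termination_by l => l.length
  decreasing_by all_goals simp

-- outer i-loop: range(len(cheese)-1) passes, breaking when a pass reports swapped=False
def loopA : Nat → List String → List String
  | 0, l => l
  | n + 1, l => if (passA l).2 then loopA n (passA l).1 else (passA l).1

def organise (eggs : List String) : String :=
  let cheese := eggs.foldl (fun cheese item => if cheese.contains item then cheese else cheese ++ [item]) []
  PySem.Str.join " | " (loopA (cheese.length - 1) cheese)

-- ===== PORT B =====
def organise_alt (eggs : List String) : String :=
  PySem.Str.join " | "
    (PySem.List.sorted2 (PySem.Set.ofList eggs) (fun s => PySem.Str.len s) (fun s => s) false)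

-- ===== PRECONDITION & SPEC =====
def Spec_organise (eggs : List String) (out : String) : Prop := out = organise_alt eggs
instance (eggs : List String) (out : String) : Decidable (Spec_organise eggs out) := by unfold Spec_organise; infer_instance

-- ===== CLAIM (what is proved, stated in full; the proofs are below) =====
def Claim_equal_organise : Prop := ∀ (eggs : List String), Dom_organise eggs → Spec_organise eggs (organise eggs)

-- ===== LEMMAS AND PROOFS =====

-- the sort key A's comparisons implement: length first, then the string itself, lexicographically
def kkey (s : String) : Lex (ℤ × String) := toLex (PySem.Str.len s, s)

lemma kkey_inj {a b : String} (h : kkey a = kkey b) : a = b := by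
  have := congrArg (fun p => (ofLex p).2) h
  simpa [kkey] using this

lemma kkey_lt_iff (a b : String) :
    kkey a < kkey b ↔ a.length < b.length ∨ (a.length = b.length ∧ a < b) := by
  rw [kkey, kkey, Prod.Lex.lt_iff]
  simp [PySem.Str.len_eq]

lemma kkey_le_iff (a b : String) :
    kkey a ≤ kkey b ↔ a.length < b.length ∨ (a.length = b.length ∧ a ≤ b) := by
  rw [kkey, kkey, Prod.Lex.le_iff]
  simp [PySem.Str.len_eq]

lemma lenGT_iff (x y : String) :
    PySem.Str.len x > PySem.Str.len y ↔ y.length < x.length := by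
  simp [PySem.Str.len_eq]

lemma lenEQ_iff (x y : String) :
    PySem.Str.len x = PySem.Str.len y ↔ x.length = y.length := by
  simp [PySem.Str.len_eq]

lemma sorted_pair (x y : String) :
    PySem.List.sorted [x, y] (fun s => s) false = if y < x then [y, x] else [x, y] := by
  simp [PySem.List.sorted, PySem.List.insertBy]

lemma pass_fst_le {x y : String} (t : List String) (h : kkey x ≤ kkey y) :
    (passA (x :: y :: t)).1 = x :: (passA (y :: t)).1 := by
  rw [kkey_le_iff] at h
  simp only [passA]
  split_ifs with h1 h2
  · rw [lenGT_iff] at h1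
    rcases h with h | ⟨h, _⟩ <;> omega
  · rw [lenEQ_iff] at h2
    have h3 : ¬ y < x := by
      rcases h with h | ⟨_, h⟩
      · omega
      · exact not_lt.mpr h
    simp [sorted_pair, h3, PySem.List.pyGetD]
  · rfl

lemma pass_fst_gt {x y : String} (t : List String) (h : ¬ kkey x ≤ kkey y) :
    (passA (x :: y :: t)).1 = y :: (passA (x :: t)).1 := by
  have hlt := (kkey_lt_iff y x).mp (not_le.mp h)
  simp only [passA]
  split_ifs with h1 h2
  · rfl
  · rw [lenEQ_iff] at h2
    have h3 : y < x := by
      rcases hlt with h' | ⟨_, h'⟩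
      · omega
      · exact h'
    simp [sorted_pair, h3, PySem.List.pyGetD]
  · exfalso
    rw [lenGT_iff] at h1
    rw [lenEQ_iff] at h2
    rcases hlt with h' | ⟨h', _⟩ <;> omega

lemma pass_perm (l : List String) : (passA l).1.Perm l := by
  match l with
  | [] => simp [passA]
  | [x] => simp [passA]
  | x :: y :: t =>
    by_cases h : kkey x ≤ kkey y
    · rw [pass_fst_le t h]; exact (pass_perm (y :: t)).cons x
    · rw [pass_fst_gt t h]
      exact ((pass_perm (x :: t)).cons y).trans (List.Perm.swap x y t)
termination_by l.length

lemma sw_false (l : List String) (h : (passA l).2 = false) :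
    l.Pairwise (fun a b => kkey a ≤ kkey b) := by
  match l with
  | [] => simp
  | [x] => simp
  | x :: y :: t =>
    rw [passA] at h
    split_ifs at h with h1 h2
    have ih := sw_false (y :: t) (by simpa using h)
    rw [lenGT_iff] at h1
    rw [lenEQ_iff] at h2
    have hxy : kkey x ≤ kkey y := (kkey_le_iff x y).mpr (Or.inl (by omega))
    refine List.Pairwise.cons ?_ ih
    intro z hz
    rcases List.mem_cons.mp hz with rfl | hz
    · exact hxy
    · exact le_trans hxy ((List.pairwise_cons.mp ih).1 z hz)
termination_by l.length

lemma pass_sorted (l : List String) (h : l.Pairwise (fun a b => kkey a ≤ kkey b)) :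
    (passA l).1 = l := by
  match l with
  | [] => simp [passA]
  | [x] => simp [passA]
  | x :: y :: t =>
    have hxy : kkey x ≤ kkey y := (List.pairwise_cons.mp h).1 y (by simp)
    rw [pass_fst_le t hxy, pass_sorted (y :: t) (List.pairwise_cons.mp h).2]
termination_by l.length

lemma loopA_id (n : Nat) (l : List String) (h : l.Pairwise (fun a b => kkey a ≤ kkey b)) :
    loopA n l = l := by
  induction n with
  | zero => rfl
  | succ n ih => cases hsw : (passA l).2 <;> simp [loopA, hsw, pass_sorted l h, ih]

lemma loopA_perm (n : Nat) (l : List String) : (loopA n l).Perm l := by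
  induction n generalizing l with
  | zero => exact List.Perm.refl l
  | succ n ih =>
    cases hsw : (passA l).2 <;> simp [loopA, hsw]
    · exact pass_perm l
    · exact (ih (passA l).1).trans (pass_perm l)

lemma pass_append (u s : List String) (hs : s.Pairwise (fun a b => kkey a ≤ kkey b))
    (hcross : ∀ y ∈ u, ∀ z ∈ s, kkey y ≤ kkey z) :
    (passA (u ++ s)).1 = (passA u).1 ++ s := by
  match u with
  | [] => simpa [passA] using pass_sorted s hs
  | [a] =>
    match s with
    | [] => simp
    | b :: s' =>
      have hab : kkey a ≤ kkey b := hcross a (by simp) b (by simp)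
      rw [List.cons_append, List.nil_append, pass_fst_le s' hab, pass_sorted (b :: s') hs]
      simp [passA]
  | a :: b :: u' =>
    by_cases h : kkey a ≤ kkey b
    · rw [List.cons_append, List.cons_append, pass_fst_le (u' ++ s) h, pass_fst_le u' h,
        ← List.cons_append,
        pass_append (b :: u') s hs (fun y hy => hcross y (by simp at hy ⊢; tauto))]
      simp
    · rw [List.cons_append, List.cons_append, pass_fst_gt (u' ++ s) h, pass_fst_gt u' h,
        ← List.cons_append,
        pass_append (a :: u') s hs (fun y hy => hcross y (by simp at hy ⊢; tauto))]
      simp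
termination_by u.length

lemma pass_max (l : List String) (hne : l ≠ []) :
    ∃ u m, (passA l).1 = u ++ [m] ∧ ∀ y ∈ l, kkey y ≤ kkey m := by
  match l with
  | [] => exact absurd rfl hne
  | [x] => exact ⟨[], x, by simp [passA], by simp⟩
  | x :: y :: t =>
    by_cases h : kkey x ≤ kkey y
    · obtain ⟨u, m, h1, h2⟩ := pass_max (y :: t) (by simp)
      refine ⟨x :: u, m, by simp [pass_fst_le t h, h1], ?_⟩
      intro w hw
      rcases List.mem_cons.mp hw with h' | h'
      · exact h' ▸ le_trans h (h2 y (by simp))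
      · exact h2 w h'
    · obtain ⟨u, m, h1, h2⟩ := pass_max (x :: t) (by simp)
      refine ⟨y :: u, m, by simp [pass_fst_gt t h, h1], ?_⟩
      intro w hw
      rcases List.mem_cons.mp hw with h' | h'
      · exact h' ▸ h2 x (by simp)
      · rcases List.mem_cons.mp h' with h'' | h''
        · exact h'' ▸ le_trans (le_of_lt (not_le.mp h)) (h2 x (by simp))
        · exact h2 w (by simp [h''])
termination_by l.length

lemma loopA_sorted (n : Nat) (u s : List String)
    (hs : s.Pairwise (fun a b => kkey a ≤ kkey b))
    (hcross : ∀ y ∈ u, ∀ z ∈ s, kkey y ≤ kkey z)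
    (hlen : u.length ≤ n + 1) :
    (loopA n (u ++ s)).Pairwise (fun a b => kkey a ≤ kkey b) := by
  induction n generalizing u s with
  | zero =>
    match u with
    | [] => simpa using hs
    | [a] =>
      rw [loopA]
      refine List.pairwise_append.mpr ⟨by simp, hs, ?_⟩
      intro w hw z hz
      simp only [List.mem_singleton] at hw
      exact hw ▸ hcross w (by simp [hw]) z hz
    | a :: b :: u' => simp at hlen
  | succ n ih =>
    have hr1 : (passA (u ++ s)).1 = (passA u).1 ++ s := pass_append u s hs hcross
    cases hsw : (passA (u ++ s)).2
    · rw [loopA, hsw]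
      simp only [Bool.false_eq_true, if_false]
      have hp := sw_false (u ++ s) hsw
      rw [pass_sorted _ hp]
      exact hp
    · rw [loopA, hsw, if_pos rfl, hr1]
      match u with
      | [] =>
        simp only [passA, List.nil_append]
        rw [loopA_id n s hs]
        exact hs
      | a :: u0 =>
        obtain ⟨u', m, h1, h2⟩ := pass_max (a :: u0) (by simp)
        rw [h1, List.append_assoc]
        have hmem : ∀ y ∈ u', y ∈ a :: u0 := by
          intro y hy
          exact (pass_perm (a :: u0)).mem_iff.mp (by rw [h1]; simp [hy])
        have hmmem : m ∈ a :: u0 :=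
          (pass_perm (a :: u0)).mem_iff.mp (by rw [h1]; simp)
        apply ih u' ([m] ++ s)
        · refine List.pairwise_cons.mpr ⟨?_, hs⟩
          intro z hz; exact hcross m hmmem z hz
        · intro y hy z hz
          rcases List.mem_cons.mp hz with rfl | hz
          · exact h2 y (hmem y hy)
          · exact hcross y (hmem y hy) z hz
        · have := (pass_perm (a :: u0)).length_eq
          rw [h1] at this; simp at this hlen; omega

lemma sorted2_eq_sorted (xs : List String) :
    PySem.List.sorted2 xs (fun s => PySem.Str.len s) (fun s => s) false
      = PySem.List.sorted xs kkey false := by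
  show List.foldl _ [] xs = List.foldl _ [] xs
  congr 1
  funext acc x
  congr 1
  funext a b
  show (decide (PySem.Str.len a < PySem.Str.len b) ||
        (!decide (PySem.Str.len b < PySem.Str.len a) && decide (a < b)))
      = decide (kkey a < kkey b)
  simp only [PySem.Str.len_eq, Nat.cast_lt]
  rcases Nat.lt_trichotomy a.length b.length with h | h | h
  · have h2 : ¬ b.length < a.length := by omega
    simp [kkey_lt_iff, h, h2]
  · have h1 : ¬ a.length < b.length := by omega
    have h2 : ¬ b.length < a.length := by omega
    simp [kkey_lt_iff, h]
  · have h1 : ¬ a.length < b.length := by omega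
    have h3 : ¬ a.length = b.length := by omega
    simp [kkey_lt_iff, h, h1, h3]

lemma dedup_foldl (eggs : List String) :
    eggs.foldl (fun cheese item => if cheese.contains item then cheese else cheese ++ [item]) []
      = PySem.Set.ofList eggs := (PySem.Set.ofList_eq_foldl eggs).symm

-- ===== VERDICT (by name: the statement is the Claim_ definition above) =====
theorem organise_spec : Claim_equal_organise := by
  intro eggs _
  unfold Spec_organise organise organise_alt
  simp only [dedup_foldl]
  set cheese := PySem.Set.ofList eggs with hch
  set ys := loopA (cheese.length - 1) cheese with hys
  have hperm : ys.Perm cheese := loopA_perm _ _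
  have hle : ys.Pairwise (fun a b => kkey a ≤ kkey b) := by
    have := loopA_sorted (cheese.length - 1) cheese [] (by simp) (by simp) (by omega)
    simpa using this
  have hnd : ys.Nodup := (hperm.symm).nodup (PySem.Set.nodup_ofList eggs)
  have hlt : ys.Pairwise (fun a b => kkey a < kkey b) := by
    refine (hle.and hnd).imp ?_
    rintro a b ⟨h1, h2⟩
    exact lt_of_le_of_ne h1 (fun he => h2 (kkey_inj he))
  rw [sorted2_eq_sorted, PySem.List.sorted_eq_of_perm_of_pairwise_lt cheese ys kkey hperm hlt]
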